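-- pv_equiv track=rewrite | github.com/SimulationEverywhere/devstone-comparative | homod.py | n_events
-- ===== SOURCE A (Python) =====
-- def n_events(width, depth):
--     calc_in = lambda x, w: 1 + (x - 1) * (w - 1)
--     exp_trans = 1
--     tr_atomics = sum(range(1, width))
--     for i in range(1, depth):
--         num_inputs = calc_in(i, width)
--         trans_first_row = (width - 1) * (num_inputs + width - 1)
--         exp_trans += num_inputs * tr_atomics + trans_first_row
--     return exp_trans
-- ===== SOURCE B (Python) =====
-- def n_events(width, depth):
--     # closed-form: the loop body is linear in i, so its sum is an arithmetic series
--     d = depth - 1 if depth > 1 else 0           # number of loop iterations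
--     tr = width * (width - 1) // 2 if width > 1 else 0   # sum(range(1, width))
--     s1 = d + (width - 1) * (d * (d - 1) // 2)   # sum of num_inputs over the iterations
--     return 1 + tr * s1 + (width - 1) * (s1 + (width - 1) * d)
-- ===== Notes on version B (the rewrite author's own statement) =====
-- stated objective: faster
-- what changed: Replaced A's O(depth) loop (and the summed range for tr_atomics) by closed-form arithmetic-series formulas evaluated in constant time.
import Mathlib
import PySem

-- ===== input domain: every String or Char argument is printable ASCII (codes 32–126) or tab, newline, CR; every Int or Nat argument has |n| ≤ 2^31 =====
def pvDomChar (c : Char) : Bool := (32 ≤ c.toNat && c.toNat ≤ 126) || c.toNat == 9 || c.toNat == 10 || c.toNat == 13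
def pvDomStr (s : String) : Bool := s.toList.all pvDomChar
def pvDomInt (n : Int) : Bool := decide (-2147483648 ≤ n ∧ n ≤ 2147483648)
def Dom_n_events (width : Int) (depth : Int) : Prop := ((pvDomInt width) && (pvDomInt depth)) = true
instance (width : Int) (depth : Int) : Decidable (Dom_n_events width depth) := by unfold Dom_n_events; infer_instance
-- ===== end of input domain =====

-- B replaces A's O(depth) loop by a closed-form arithmetic-series summation (objective: faster, asymptotic).

-- ===== PORT A =====
def n_events (width : Int) (depth : Int) : Int :=
  let calc_in := fun (x w : Int) => 1 + (x - 1) * (w - 1)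
  let tr_atomics := (PySem.List.pyRange 1 width 1).foldl (· + ·) 0
  (PySem.List.pyRange 1 depth 1).foldl
    (fun exp_trans i =>
      let num_inputs := calc_in i width
      let trans_first_row := (width - 1) * (num_inputs + width - 1)
      exp_trans + (num_inputs * tr_atomics + trans_first_row)) 1

-- ===== PORT B =====
def n_events_alt (width : Int) (depth : Int) : Int :=
  let d := if depth > 1 then depth - 1 else 0
  let tr := if width > 1 then PySem.Int.floordiv (width * (width - 1)) 2 else 0
  let s1 := d + (width - 1) * PySem.Int.floordiv (d * (d - 1)) 2
  1 + tr * s1 + (width - 1) * (s1 + (width - 1) * d)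

-- ===== PRECONDITION & SPEC =====
def Spec_n_events (width : Int) (depth : Int) (out : Int) : Prop := out = n_events_alt width depth
instance (width : Int) (depth : Int) (out : Int) : Decidable (Spec_n_events width depth out) := by unfold Spec_n_events; infer_instance

-- ===== CLAIM (what is proved, stated in full; the proofs are below) =====
def Claim_equal_n_events : Prop := ∀ (width : Int) (depth : Int), Dom_n_events width depth → Spec_n_events width depth (n_events width depth)

-- ===== LEMMAS AND PROOFS =====

-- floor-division of an explicitly even integer by 2 is exact
theorem fdiv_two_of_double (a b : Int) (h : b = 2 * a) : PySem.Int.floordiv b 2 = a := by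
  rw [PySem.Int.floordiv_eq_ediv_of_pos (by omega), h, Int.mul_ediv_cancel_left _ (by omega)]

-- sum(range(1, w)) doubled is w*(w-1) for w ≥ 1
theorem sum_range_one (w : Int) (hw : 1 ≤ w) :
    2 * (PySem.List.pyRange 1 w 1).foldl (· + ·) 0 = w * (w - 1) := by
  obtain ⟨n, rfl⟩ : ∃ n : Nat, w = 1 + (n : Int) := ⟨(w - 1).toNat, by omega⟩
  induction n with
  | zero => simp
  | succ k ih =>
    have h1 : (1 : Int) + ((k + 1 : Nat) : Int) = (1 + (k : Int)) + 1 := by push_cast; ring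
    rw [h1, PySem.List.pyRange_one_succ_right (by omega), List.foldl_append]
    simp only [List.foldl]
    have := ih (by omega)
    push_cast at this ⊢
    nlinarith [this]

-- the loop of A, doubled, in closed form (n loop iterations)
theorem loopA (w T : Int) (n : Nat) :
    2 * ((PySem.List.pyRange 1 (1 + (n : Int)) 1).foldl
      (fun e i => e + ((1 + (i - 1) * (w - 1)) * T + (w - 1) * ((1 + (i - 1) * (w - 1)) + w - 1))) 1)
    = 2 + T * (2 * n + (w - 1) * (n * (n - 1)))
        + (w - 1) * ((2 * n + (w - 1) * (n * (n - 1))) + (w - 1) * (2 * n)) := by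
  induction n with
  | zero => simp
  | succ k ih =>
    have h1 : (1 : Int) + ((k + 1 : Nat) : Int) = (1 + (k : Int)) + 1 := by push_cast; ring
    rw [h1, PySem.List.pyRange_one_succ_right (by omega), List.foldl_append]
    simp only [List.foldl]
    push_cast at ih ⊢
    nlinarith [ih]

theorem n_events_eq (width depth : Int) : n_events width depth = n_events_alt width depth := by
  unfold n_events n_events_alt
  simp only []
  set T := (PySem.List.pyRange 1 width 1).foldl (· + ·) 0 with hT
  -- tr on the B side equals T
  have htr : (if width > 1 then PySem.Int.floordiv (width * (width - 1)) 2 else 0) = T := by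
    split_ifs with h
    · exact (fdiv_two_of_double T _ (sum_range_one width (by omega)).symm)
    · rw [hT, PySem.List.pyRange_one_eq_nil (by omega)]; rfl
  rw [htr]
  by_cases hd : depth > 1
  · simp only [if_pos hd]
    obtain ⟨n, hn⟩ : ∃ n : Nat, depth = 1 + (n : Int) := ⟨(depth - 1).toNat, by omega⟩
    have hA := loopA width T n
    rw [hn] at *
    have hs1 : PySem.Int.floordiv (((1 + (n:Int)) - 1) * (((1 + (n:Int)) - 1) - 1)) 2
        = ((n : Int) * ((n : Int) - 1)) / 2 := by
      rw [PySem.Int.floordiv_eq_ediv_of_pos (by omega)]; ring_nf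
    have heven : (n : Int) * ((n : Int) - 1) = 2 * (((n : Int) * ((n : Int) - 1)) / 2) := by
      rcases Int.even_mul_pred_self (n : Int) with ⟨c, hc⟩
      omega
    rw [hs1]
    set c := ((n : Int) * ((n : Int) - 1)) / 2 with hc
    -- rewrite A's foldl body to match loopA's body shape
    have hbody : ((PySem.List.pyRange 1 (1 + (n:Int)) 1).foldl
        (fun exp_trans i => exp_trans + ((1 + (i - 1) * (width - 1)) * T + (width - 1) * ((1 + (i - 1) * (width - 1)) + width - 1))) 1)
        = 1 + T * ((1 + (n:Int) - 1) + (width - 1) * c) + (width - 1) * (((1 + (n:Int) - 1) + (width - 1) * c) + (width - 1) * (1 + (n:Int) - 1)) := by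
      rw [heven] at hA
      have h2 : (2:Int) + T * (2 * (n:Int) + (width - 1) * (2 * c))
          + (width - 1) * ((2 * (n:Int) + (width - 1) * (2 * c)) + (width - 1) * (2 * (n:Int)))
          = 2 * (1 + T * ((1 + (n:Int) - 1) + (width - 1) * c) + (width - 1) * (((1 + (n:Int) - 1) + (width - 1) * c) + (width - 1) * (1 + (n:Int) - 1))) := by
        ring
      rw [h2] at hA
      omega
    exact hbody
  · simp only [if_neg hd]
    rw [PySem.List.pyRange_one_eq_nil (by omega : depth ≤ 1)]
    simp [List.foldl, PySem.Int.floordiv]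

-- ===== VERDICT (by name: the statement is the Claim_ definition above) =====
theorem n_events_spec : Claim_equal_n_events := by
  intro w d _
  exact n_events_eq w d
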